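-- pv_equiv track=rewrite | github.com/9nightss/KOD8_ENC | kod8_engine.py | op_block_xor_cbc
-- ===== SOURCE A (Python) =====
-- KOD8_KEY      = "86247931"
--
-- def op_block_xor_cbc(text: str, encrypt: bool, block_size: int = 8, **_) -> str:
--     """
--     BLOCK XOR CASCADE  (CBC-mode inspired)
--     ----------------------------------------
--     Encrypt: divide into blocks of `block_size` chars, XOR each block with
--     the PREVIOUS ENCRYPTED block before storing.
--
--         IV  = KOD8_KEY repeated/truncated to `block_size`  →  "86247931"
--         B0' = XOR(B0, IV)
--         B1' = XOR(B1, B0')   ← chain on previous CIPHERTEXT block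
--         B2' = XOR(B2, B1')  …
--
--     Decrypt: XOR each ciphertext block with the previous ciphertext block
--     (which is already known), going forward through the list:
--         B0  = XOR(B0', IV)
--         B1  = XOR(B1', B0')  …
--
--     Why it's here: CBC-mode diffusion at block level.  A single changed
--     character in block N corrupts all subsequent blocks — impossible to
--     surgically modify one file section without corrupting the rest.
--     Safe at any chain position — operates on ordinals only.
--     """
--     if not text:
--         return text
--
--     pad    = (-len(text)) % block_size
--     padded = text + "\x00" * pad
--     blocks = [padded[i:i + block_size] for i in range(0, len(padded), block_size)]
--     iv     = (KOD8_KEY * ((block_size // len(KOD8_KEY)) + 1))[:block_size]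
--
--     def xor_str(a: str, b: str) -> str:
--         return "".join(chr(ord(x) ^ ord(y)) for x, y in zip(a, b))
--
--     result_blocks = []
--     if encrypt:
--         prev = iv
--         for block in blocks:
--             enc = xor_str(block, prev)
--             result_blocks.append(enc)
--             prev = enc
--     else:
--         prev = iv
--         for block in blocks:
--             result_blocks.append(xor_str(block, prev))
--             prev = block           # chain on CIPHERTEXT block
--
--     result = "".join(result_blocks)
--     return result.rstrip("\x00") if not encrypt else result
-- ===== SOURCE B (Python) =====
-- KOD8_KEY = "86247931"
--
-- def op_block_xor_cbc(text: str, encrypt: bool, block_size: int = 8, **_) -> str: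
--     if not text:
--         return text
--     pad = (-len(text)) % block_size
--     padded = text + "\x00" * pad
--     iv = (KOD8_KEY * ((block_size // len(KOD8_KEY)) + 1))[:block_size]
--     out = []
--     for i in range(len(padded)):
--         if i < block_size:
--             partner = iv[i]
--         elif encrypt:
--             partner = out[i - block_size]
--         else:
--             partner = padded[i - block_size]
--         out.append(chr(ord(padded[i]) ^ ord(partner)))
--     res = "".join(out)
--     return res if encrypt else res.rstrip("\x00")
-- ===== Notes on version B (the rewrite author's own statement) =====
-- stated objective: simpler
-- what changed: Replaces the block list, the xor_str/zip helper and the two prev-chaining block loops by a single flat loop over character indices whose XOR partner is iv[i] for i < block_size and otherwise the output (encrypt) or the padded input (decrypt) one block back.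
-- outside the precondition, e.g. on op_block_xor_cbc('ab', True, -8): A returns '', B raises IndexError
import Mathlib
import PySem

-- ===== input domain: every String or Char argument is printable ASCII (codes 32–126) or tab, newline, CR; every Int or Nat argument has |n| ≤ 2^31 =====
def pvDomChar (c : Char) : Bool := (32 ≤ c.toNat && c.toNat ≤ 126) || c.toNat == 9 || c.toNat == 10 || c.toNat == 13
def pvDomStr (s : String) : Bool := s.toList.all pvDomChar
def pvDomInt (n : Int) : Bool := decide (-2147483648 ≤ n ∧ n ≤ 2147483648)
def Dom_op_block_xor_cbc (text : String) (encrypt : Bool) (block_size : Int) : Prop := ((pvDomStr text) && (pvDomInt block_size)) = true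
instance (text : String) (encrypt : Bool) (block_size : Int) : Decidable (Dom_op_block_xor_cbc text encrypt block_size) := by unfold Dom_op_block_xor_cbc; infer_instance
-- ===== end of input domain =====

-- B replaces A's block list, xor_str/zip helper and the two prev-chaining block loops by one flat
-- loop over character indices (objective: simpler); return-value equivalence on block_size ≥ 1.

-- ===== PORT A =====
-- KOD8_KEY = "86247931"
def pvKey : List Char := ['8', '6', '2', '4', '7', '9', '3', '1']

-- chr(ord(x) ^ ord(y))
def pvXorChar (x y : Char) : Char := Char.ofNat (x.toNat ^^^ y.toNat)

-- xor_str(a, b) = "".join(chr(ord(x) ^ ord(y)) for x, y in zip(a, b))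
def pvXorStr (a b : List Char) : List Char := (a.zip b).map (fun p => pvXorChar p.1 p.2)

def op_block_xor_cbc (text : String) (encrypt : Bool) (block_size : Int) : String :=
  let cs := text.toList
  if cs = [] then text else
  let pad : Int := PySem.Int.mod (-(cs.length : Int)) block_size
  let padded : List Char := cs ++ PySem.List.pyRepeat ['\x00'] pad
  let blocks : List (List Char) :=
    (PySem.List.pyRange 0 (padded.length : Int) block_size).map
      (fun i => PySem.List.slice padded (some i) (some (i + block_size)))
  let iv : List Char :=
    PySem.List.slice (PySem.List.pyRepeat pvKey (PySem.Int.floordiv block_size (pvKey.length : Int) + 1))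
      none (some block_size)
  let resultBlocks : List (List Char) :=
    if encrypt then
      -- enc = xor_str(block, prev); result_blocks.append(enc); prev = enc
      (blocks.foldl (fun st block =>
        (st.1 ++ [pvXorStr block st.2], pvXorStr block st.2)) (([] : List (List Char)), iv)).1
    else
      -- result_blocks.append(xor_str(block, prev)); prev = block
      (blocks.foldl (fun st block =>
        (st.1 ++ [pvXorStr block st.2], block)) (([] : List (List Char)), iv)).1
  let result : List Char := resultBlocks.flatten   -- "".join(result_blocks)
  if encrypt then String.ofList result
  -- result.rstrip("\x00") ported by hand: drop trailing chars of the one-char strip set (exact)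
  else String.ofList ((result.reverse.dropWhile (· == '\x00')).reverse)

-- ===== PORT B =====
def op_block_xor_cbc_alt (text : String) (encrypt : Bool) (block_size : Int) : String :=
  let cs := text.toList
  if cs = [] then text else
  let pad : Int := PySem.Int.mod (-(cs.length : Int)) block_size
  let padded : List Char := cs ++ PySem.List.pyRepeat ['\x00'] pad
  let iv : List Char :=
    PySem.List.slice (PySem.List.pyRepeat pvKey (PySem.Int.floordiv block_size (pvKey.length : Int) + 1))
      none (some block_size)
  let out : List Char :=
    (PySem.List.pyRange 0 (padded.length : Int) 1).foldl
      (fun out i =>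
        out ++ [pvXorChar (PySem.List.pyGetD padded i '\x00')
          (if i < block_size then PySem.List.pyGetD iv i '\x00'
           else if encrypt then PySem.List.pyGetD out (i - block_size) '\x00'
           else PySem.List.pyGetD padded (i - block_size) '\x00')]) []
  if encrypt then String.ofList out
  -- res.rstrip("\x00") ported by hand: drop trailing NULs (exact for the one-char strip set)
  else String.ofList ((out.reverse.dropWhile (· == '\x00')).reverse)

-- ===== PRECONDITION & SPEC =====
-- Pre_ excludes non-empty text with block_size = 0, where A raises ZeroDivisionError, and with
-- block_size < 0, where A's empty-string result is an accident of a negative range step and B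
-- raises IndexError; on empty text both return the empty string for every block_size.
def Pre_op_block_xor_cbc (text : String) (encrypt : Bool) (block_size : Int) : Prop := text = "" ∨ 1 ≤ block_size
instance (text : String) (encrypt : Bool) (block_size : Int) : Decidable (Pre_op_block_xor_cbc text encrypt block_size) := by unfold Pre_op_block_xor_cbc; infer_instance

def pvWitness_op_block_xor_cbc : String × Bool × Int := ("hi", true, 3)

def Spec_op_block_xor_cbc (text : String) (encrypt : Bool) (block_size : Int) (out : String) : Prop := out = op_block_xor_cbc_alt text encrypt block_size
instance (text : String) (encrypt : Bool) (block_size : Int) (out : String) : Decidable (Spec_op_block_xor_cbc text encrypt block_size out) := by unfold Spec_op_block_xor_cbc; infer_instance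

-- ===== CLAIM (what is proved, stated in full; the proofs are below) =====
def Claim_equal_op_block_xor_cbc : Prop := ∀ (text : String) (encrypt : Bool) (block_size : Int), Dom_op_block_xor_cbc text encrypt block_size → Pre_op_block_xor_cbc text encrypt block_size → Spec_op_block_xor_cbc text encrypt block_size (op_block_xor_cbc text encrypt block_size)

-- ===== LEMMAS AND PROOFS =====

-- the padded text cut into m blocks of b characters
def pvChunks (b : Nat) : Nat → List Char → List (List Char)
  | 0, _ => []
  | m + 1, xs => xs.take b :: pvChunks b m (xs.drop b)

-- the CBC chain over a list of blocks: each block is XORed with prev; prev becomes the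
-- ciphertext block when encrypting and the input block when decrypting
def pvChain (enc : Bool) : List Char → List (List Char) → List Char
  | _, [] => []
  | prev, x :: rest => pvXorStr x prev ++ pvChain enc (if enc then pvXorStr x prev else x) rest

-- B's loop body once the Int index has been turned into a Nat
def pvStep (enc : Bool) (b : Nat) (iv padded : List Char) (out : List Char) (k : Nat) : List Char :=
  out ++ [pvXorChar (padded.getD k '\x00')
    (if k < b then iv.getD k '\x00'
     else if enc then out.getD (k - b) '\x00' else padded.getD (k - b) '\x00')]

-- A's encrypt loop, flattened, is the chain
theorem pvA_enc (blocks : List (List Char)) (acc : List (List Char)) (prev : List Char) :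
    ((blocks.foldl (fun st block =>
        (st.1 ++ [pvXorStr block st.2], pvXorStr block st.2)) (acc, prev)).1).flatten = acc.flatten ++ pvChain true prev blocks := by
  induction blocks generalizing acc prev with
  | nil => simp [pvChain]
  | cons x rest ih => simp [List.foldl_cons, pvChain, ih, List.flatten_append]

-- A's decrypt loop, flattened, is the chain
theorem pvA_dec (blocks : List (List Char)) (acc : List (List Char)) (prev : List Char) :
    ((blocks.foldl (fun st block =>
        (st.1 ++ [pvXorStr block st.2], block)) (acc, prev)).1).flatten = acc.flatten ++ pvChain false prev blocks := by
  induction blocks generalizing acc prev with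
  | nil => simp [pvChain]
  | cons x rest ih => simp [List.foldl_cons, pvChain, ih, List.flatten_append]

theorem pv_chunks_map (b : Nat) : ∀ (m : Nat) (xs : List Char),
    (List.range m).map (fun k => (xs.drop (b * k)).take b) = pvChunks b m xs := by
  intro m
  induction m with
  | zero => intro xs; simp [pvChunks]
  | succ m ih =>
    intro xs
    rw [List.range_succ_eq_map]
    simp only [List.map_cons, List.map_map, Nat.mul_zero, List.drop_zero]
    rw [pvChunks]
    congr 1
    rw [← ih (xs.drop b)]
    apply List.map_congr_left
    intro k _
    simp [Function.comp, Nat.mul_succ, List.drop_drop]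
    ring_nf

theorem pvA_blocks (b : Nat) (hb : 1 ≤ b) (xs : List Char) (m : Nat) (hm : xs.length = m * b) :
    (PySem.List.pyRange 0 (xs.length : Int) (b : Int)).map
      (fun i => PySem.List.slice xs (some i) (some (i + (b : Int)))) = pvChunks b m xs := by
  rw [PySem.List.pyRange_of_pos _ _ (by exact_mod_cast hb)]
  have hcount : (if (0:Int) < (xs.length : Int) then (((xs.length : Int) - 0 + (b:Int) - 1) / (b:Int)).toNat else 0) = m := by
    by_cases h : (0:Int) < (xs.length : Int)
    · rw [if_pos h]
      have hb' : (0:Int) < (b:Int) := by exact_mod_cast hb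
      have : ((xs.length : Int) - 0 + (b:Int) - 1) / (b:Int) = m := by
        rw [hm]
        push_cast
        have : ((m:Int) * b + b - 1) = ((b:Int) - 1) + m * b := by ring
        rw [show ((m:Int) * (b:Int) - 0 + (b:Int) - 1) = ((b:Int) - 1) + (m:Int) * (b:Int) by ring]
        rw [Int.add_mul_ediv_right _ _ (by omega)]
        rw [Int.ediv_eq_zero_of_lt (by omega) (by omega)]
        omega
      rw [this]; simp
    · rw [if_neg h]
      have h0 : m * b = 0 := by omega
      have := (Nat.mul_eq_zero.mp h0).resolve_right (by omega)
      omega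
  rw [hcount, List.map_map, ← pv_chunks_map b m xs]
  apply List.map_congr_left
  intro k _
  show PySem.List.slice xs (some (0 + (b:Int) * (k:Int))) (some (0 + (b:Int) * (k:Int) + (b:Int))) = _
  rw [show (0 + (b:Int) * (k:Int)) = ((b * k : Nat) : Int) by push_cast; ring]
  rw [show (((b * k : Nat) : Int) + (b:Int)) = ((b * k : Nat) : Int) + ((b : Nat) : Int) by norm_num]
  rw [PySem.List.slice_natCast_add]

theorem pvB_block (enc : Bool) (b : Nat) (iv padded : List Char) :
    ∀ (x prev out : List Char), x.length = prev.length → x.length ≤ b →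
    (∀ t < x.length, (if out.length + t < b then iv.getD (out.length + t) '\x00'
        else if enc then out.getD (out.length + t - b) '\x00'
        else padded.getD (out.length + t - b) '\x00') = prev.getD t '\x00') →
    (∀ t < x.length, padded.getD (out.length + t) '\x00' = x.getD t '\x00') →
    (List.range' out.length x.length).foldl (pvStep enc b iv padded) out = out ++ pvXorStr x prev := by
  intro x
  induction x with
  | nil =>
    intro prev out _ _ _ _
    simp [pvXorStr]
  | cons c x' ih =>
    intro prev out hlen hxb hpart hx
    cases prev with
    | nil => simp at hlen
    | cons p prev' =>
      rw [show (c :: x').length = x'.length + 1 from rfl, List.range'_succ, List.foldl_cons]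
      have hstep : pvStep enc b iv padded out out.length = out ++ [pvXorChar c p] := by
        unfold pvStep
        have h1 : padded.getD out.length '\x00' = c := by
          have := hx 0 (by simp)
          simpa using this
        have h2 : (if out.length < b then iv.getD out.length '\x00'
            else if enc then out.getD (out.length - b) '\x00'
            else padded.getD (out.length - b) '\x00') = p := by
          have := hpart 0 (by simp)
          simpa using this
        rw [h1, h2]
      rw [hstep]
      have hlen1 : (out ++ [pvXorChar c p]).length = out.length + 1 := by simp
      rw [show out.length + 1 = (out ++ [pvXorChar c p]).length from hlen1.symm]
      rw [ih prev' (out ++ [pvXorChar c p]) (by simpa using hlen) (by simp at hxb ⊢; omega)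
        ?_ ?_]
      · simp [pvXorStr]
      · -- partner hypothesis shifted by one
        intro t ht
        rw [hlen1]
        have hmain := hpart (t + 1) (by simp; omega)
        have harr : out.length + (t + 1) = out.length + 1 + t := by omega
        rw [harr] at hmain
        by_cases hlt : out.length + 1 + t < b
        · rw [if_pos hlt] at hmain ⊢
          simpa using hmain
        · rw [if_neg hlt] at hmain ⊢
          cases enc with
          | false => simpa using hmain
          | true =>
            simp only [if_true] at hmain ⊢
            have hidx : out.length + 1 + t - b < out.length := by
              simp at hxb
              omega
            rw [List.getD_append _ _ _ _ hidx]
            simpa using hmain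
      · intro t ht
        rw [hlen1]
        have := hx (t + 1) (by simp; omega)
        rw [show out.length + (t + 1) = out.length + 1 + t by omega] at this
        simpa using this

theorem pvB_main (enc : Bool) (b : Nat) (iv padded : List Char) :
    ∀ (m : Nat) (out prev : List Char), prev.length = b →
    out.length + m * b = padded.length →
    (∀ t < b, (if out.length + t < b then iv.getD (out.length + t) '\x00'
        else if enc then out.getD (out.length + t - b) '\x00'
        else padded.getD (out.length + t - b) '\x00') = prev.getD t '\x00') →
    (List.range' out.length (m * b)).foldl (pvStep enc b iv padded) out
      = out ++ pvChain enc prev (pvChunks b m (padded.drop out.length)) := by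
  intro m
  induction m with
  | zero => intro out prev _ _ _; simp [pvChunks, pvChain]
  | succ m ih =>
    intro out prev hprev hlen hpart
    set i0 := out.length with hi0
    have hmul : (m + 1) * b = m * b + b := by ring
    rw [hmul] at hlen
    set x : List Char := ((padded.drop i0).take b) with hxdef
    have hrest : (padded.drop i0).length = m * b + b := by
      simp [hi0]; omega
    have hxlen : x.length = b := by
      rw [hxdef, List.length_take, hrest]; omega
    have hxgetD : ∀ t < b, padded.getD (i0 + t) '\x00' = x.getD t '\x00' := by
      intro t ht
      simp only [hxdef, List.getD_eq_getElem?_getD]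
      rw [List.getElem?_take_of_lt ht, List.getElem?_drop]
    -- split the range
    have hsplit : List.range' i0 ((m + 1) * b) = List.range' i0 b ++ List.range' (i0 + b) (m * b) := by
      rw [hmul, show m * b + b = b + m * b by ring, ← List.range'_append]
      simp
    rw [hsplit, List.foldl_append]
    have hblock := pvB_block enc b iv padded x prev out
      (by omega) (by omega)
      (by intro t ht; exact hpart t (by omega))
      (by intro t ht; exact hxgetD t (by omega))
    rw [hxlen] at hblock
    rw [← hi0] at hblock
    rw [hblock]
    set y := pvXorStr x prev with hydef
    have hylen : y.length = b := by
      simp [hydef, pvXorStr]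
      omega
    have hout1 : (out ++ y).length = i0 + b := by simp [hylen]; omega
    set prev1 : List Char := if enc then y else x with hprev1
    have hprev1len : prev1.length = b := by
      cases enc <;> simp [hprev1, hxlen, hylen]
    have hih := ih (out ++ y) prev1 hprev1len (by rw [hout1]; omega) ?_
    · rw [hout1] at hih
      rw [hih]
      rw [pvChunks]
      rw [← hxdef]
      cases enc with
      | true => simp [pvChain, hprev1, hydef, List.append_assoc]
      | false => simp [pvChain, hprev1, hydef, List.append_assoc]
    · -- the shifted partner hypothesis
      intro t ht
      rw [hout1]
      have hnlt : ¬ (i0 + b + t < b) := by omega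
      rw [if_neg hnlt]
      have hidx : i0 + b + t - b = i0 + t := by omega
      rw [hidx]
      cases enc with
      | true =>
        simp only [if_true]
        rw [List.getD_eq_getElem?_getD, List.getElem?_append_right (by omega : out.length ≤ i0 + t)]
        rw [show i0 + t - out.length = t by omega]
        rw [← List.getD_eq_getElem?_getD]
        simp [hprev1]
      | false =>
        simp only [Bool.false_eq_true, if_false]
        rw [hxgetD t ht]
        simp [hprev1]

theorem pvB_conv (enc : Bool) (b : Nat) (iv padded : List Char) :
    (PySem.List.pyRange 0 (padded.length : Int) 1).foldl
      (fun out i =>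
        let partner : Char :=
          if i < (b : Int) then PySem.List.pyGetD iv i '\x00'
          else if enc then PySem.List.pyGetD out (i - (b : Int)) '\x00'
          else PySem.List.pyGetD padded (i - (b : Int)) '\x00'
        out ++ [pvXorChar (PySem.List.pyGetD padded i '\x00') partner]) []
    = (List.range padded.length).foldl (pvStep enc b iv padded) [] := by
  rw [PySem.List.pyRange_one, List.foldl_map]
  have hn : ((padded.length : Int) - 0).toNat = padded.length := by omega
  rw [hn]
  apply PySem.List.foldl_congr_mem
  intro out k hk
  simp only [zero_add]
  unfold pvStep
  by_cases hlt : k < b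
  · simp [hlt, (by exact_mod_cast hlt : (k:Int) < (b:Int))]
  · have hsub : (k : Int) - (b : Int) = ((k - b : Nat) : Int) := by omega
    have hlt' : ¬ ((k:Int) < (b:Int)) := by exact_mod_cast hlt
    cases enc <;> simp [hlt, hlt', hsub]

-- ===== VERDICT (by name: the statement is the Claim_ definition above) =====
theorem op_block_xor_cbc_spec : Claim_equal_op_block_xor_cbc := by
  intro text encrypt bs _ hpre
  unfold Pre_op_block_xor_cbc at hpre
  unfold Spec_op_block_xor_cbc op_block_xor_cbc op_block_xor_cbc_alt
  by_cases hcs : text.toList = []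
  · simp [hcs]
  · have hbs : 1 ≤ bs := by
      rcases hpre with h | h
      · exact absurd (by rw [h]; rfl) hcs
      · exact h
    simp only [if_neg hcs]
    set cs := text.toList with hcsdef
    set pad : Int := PySem.Int.mod (-(cs.length : Int)) bs with hpaddef
    set padded : List Char := cs ++ PySem.List.pyRepeat ['\x00'] pad with hpadded
    set iv : List Char :=
      PySem.List.slice (PySem.List.pyRepeat pvKey (PySem.Int.floordiv bs (pvKey.length : Int) + 1))
        none (some bs) with hivdef
    -- b : the block size as a Nat
    set b : Nat := bs.toNat with hbdef
    have hbcast : (b : Int) = bs := Int.toNat_of_nonneg (by omega)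
    have hb1 : 1 ≤ b := by omega
    -- bounds on pad
    have hpad0 : 0 ≤ pad := PySem.Int.mod_nonneg _ (by omega)
    have hpadlt : pad < bs := PySem.Int.mod_lt _ (by omega)
    -- the padded length is a multiple of b
    have hf := PySem.Int.floordiv_mul_add_mod (-(cs.length : Int)) bs
    rw [← hpaddef] at hf
    set f := PySem.Int.floordiv (-(cs.length : Int)) bs with hfdef
    have hfb : f * bs ≤ 0 := by omega
    have hfle : f ≤ 0 := by
      by_contra h
      have h' : 0 < f := lt_of_not_ge h
      have : 0 < f * bs := mul_pos h' (by omega)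
      omega
    set m : Nat := (-f).toNat with hmdef
    have hm_int : ((m : Nat) : Int) = -f := Int.toNat_of_nonneg (by omega)
    have hmb : ((m * b : Nat) : Int) = (-f) * bs := by push_cast [hm_int, hbcast]; ring_nf
    have hplen : padded.length = m * b := by
      have h1 : (padded.length : Int) = (cs.length : Int) + pad := by
        rw [hpadded]
        simp [PySem.List.pyRepeat, Int.toNat_of_nonneg hpad0]
      have h2 : (cs.length : Int) + pad = (-f) * bs := by
        have : (-f) * bs = -(f * bs) := by ring
        omega
      have := h1.trans (h2.trans hmb.symm)
      exact_mod_cast this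
    -- iv has exactly b characters
    have hkey8 : ((pvKey.length : Nat) : Int) = 8 := by norm_num [pvKey]
    have hivlen : iv.length = b := by
      rw [hivdef, PySem.List.slice_to _ (show (0:Int) ≤ bs by omega)]
      set q : Int := PySem.Int.floordiv bs (pvKey.length : Int) + 1 with hqdef
      have h8 := PySem.Int.floordiv_mul_add_mod bs (8 : Int)
      set f8 := PySem.Int.floordiv bs 8 with hf8def
      have hr0 : 0 ≤ PySem.Int.mod bs 8 := PySem.Int.mod_nonneg _ (by omega)
      have hrlt : PySem.Int.mod bs 8 < 8 := PySem.Int.mod_lt _ (by omega)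
      have hf80 : 0 ≤ f8 := by
        by_contra h
        have h' : f8 < 0 := lt_of_not_ge h
        have : f8 * 8 ≤ -8 := by nlinarith
        omega
      have hq : q = f8 + 1 := by rw [hqdef, hkey8]
      have hqpos : 0 ≤ q := by omega
      have hlenrep : (PySem.List.pyRepeat pvKey q).length = q.toNat * 8 := by
        simp [PySem.List.pyRepeat, pvKey, Nat.mul_comm]
      have hble : b ≤ q.toNat * 8 := by
        have h1 : (bs : Int) ≤ q * 8 := by rw [hq]; nlinarith
        have h2 : ((q.toNat * 8 : Nat) : Int) = q * 8 := by
          push_cast [Int.toNat_of_nonneg hqpos]; ring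
        omega
      rw [List.length_take, hlenrep]
      omega
    -- A's blocks are the chunks
    have hblocks : (PySem.List.pyRange 0 (padded.length : Int) bs).map
        (fun i => PySem.List.slice padded (some i) (some (i + bs))) = pvChunks b m padded := by
      rw [← hbcast]
      exact pvA_blocks b hb1 padded m hplen
    -- B's loop is the chain
    have hB : ∀ enc : Bool, (PySem.List.pyRange 0 (padded.length : Int) 1).foldl
        (fun out i =>
          out ++ [pvXorChar (PySem.List.pyGetD padded i '\x00')
            (if i < bs then PySem.List.pyGetD iv i '\x00'
             else if enc then PySem.List.pyGetD out (i - bs) '\x00'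
             else PySem.List.pyGetD padded (i - bs) '\x00')]) []
        = pvChain enc iv (pvChunks b m padded) := by
      intro enc
      rw [← hbcast]
      rw [pvB_conv enc b iv padded]
      rw [List.range_eq_range', hplen]
      have hmain := pvB_main enc b iv padded m [] iv hivlen (by simpa using hplen.symm)
        (by intro t ht; simp [ht])
      simpa using hmain
    -- A's loops are the chain
    have hAenc : ((((PySem.List.pyRange 0 (padded.length : Int) bs).map
          (fun i => PySem.List.slice padded (some i) (some (i + bs)))).foldl
        (fun st block => (st.1 ++ [pvXorStr block st.2], pvXorStr block st.2))
        (([] : List (List Char)), iv)).1).flatten = pvChain true iv (pvChunks b m padded) := by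
      rw [hblocks]
      simpa using pvA_enc (pvChunks b m padded) [] iv
    have hAdec : ((((PySem.List.pyRange 0 (padded.length : Int) bs).map
          (fun i => PySem.List.slice padded (some i) (some (i + bs)))).foldl
        (fun st block => (st.1 ++ [pvXorStr block st.2], block))
        (([] : List (List Char)), iv)).1).flatten = pvChain false iv (pvChunks b m padded) := by
      rw [hblocks]
      simpa using pvA_dec (pvChunks b m padded) [] iv
    cases encrypt with
    | true =>
      have hBt := hB true
      simp only [if_true] at hBt
      simp [hAenc, hBt]
    | false =>
      have hBf := hB false
      simp only [Bool.false_eq_true, if_false] at hBf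
      simp [hAdec, hBf]
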